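-- pv_equiv track=rewrite | github.com/anantham/map-tpot | tpot-analyzer/src/graph/hierarchy/expansion_strategy.py | execute_tag_split
-- ===== SOURCE A (Python) =====
-- from typing import Dict, List, Optional, Set, Tuple
--
-- def execute_tag_split(
--     member_node_ids: List[str],
--     node_tags: Dict[str, Set[str]],
--     tag_counts: Dict[str, int],
-- ) -> List[List[str]]:
--     """Split cluster members by their tags.
--
--     Args:
--         member_node_ids: All members of the cluster
--         node_tags: Mapping from node ID to set of tags
--         tag_counts: Count of each tag in this cluster
--
--     Returns:
--         List of sub-cluster member lists, one per tag + untagged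
--     """
--     # Sort tags by count descending
--     sorted_tags = sorted(tag_counts.keys(), key=lambda t: tag_counts[t], reverse=True)
--
--     sub_clusters: Dict[str, List[str]] = {tag: [] for tag in sorted_tags}
--     sub_clusters["_untagged"] = []
--
--     assigned = set()
--
--     # Assign each node to its primary (most specific) tag
--     for nid in member_node_ids:
--         nid_tags = node_tags.get(nid, set())
--         if nid_tags:
--             # Use the first matching tag in sorted order (most common)
--             for tag in sorted_tags:
--                 if tag in nid_tags:
--                     sub_clusters[tag].append(nid)
--                     assigned.add(nid)
--                     break
--         else:
--             sub_clusters["_untagged"].append(nid)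
--             assigned.add(nid)
--
--     # Filter empty clusters and return
--     result = [members for members in sub_clusters.values() if members]
--     result.sort(key=len, reverse=True)
--
--     return result
-- ===== SOURCE B (Python) =====
-- def execute_tag_split(member_node_ids, node_tags, tag_counts):
--     sorted_tags = sorted(tag_counts.keys(), key=lambda t: tag_counts[t], reverse=True)
--     rank = {t: i for i, t in enumerate(sorted_tags)}
--     buckets = [[] for _ in sorted_tags]
--     # the untagged bucket is the bucket named "_untagged"; if that name is not a
--     # ranked tag, allocate one extra bucket for it at the end
--     untagged = rank.get("_untagged")
--     if untagged is None:
--         untagged = len(buckets)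
--         buckets.append([])
--     for nid in member_node_ids:
--         tags = node_tags.get(nid)
--         if not tags:
--             buckets[untagged].append(nid)
--         else:
--             ranks = [rank[t] for t in tags if t in rank]
--             if ranks:
--                 buckets[min(ranks)].append(nid)
--     return sorted((b for b in buckets if b), key=len, reverse=True)
-- ===== Notes on version B (the rewrite author's own statement) =====
-- stated objective: faster
-- what changed: Instead of keeping a tag-keyed dict of buckets and scanning the sorted tag list per node with break, B precomputes a tag->rank index once and assigns each node by the minimum rank over its own tags into a positional bucket array (the reserved '_untagged' bucket is the extra last bucket, or the '_untagged' tag's own bucket if that tag is ranked).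
import Mathlib
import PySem

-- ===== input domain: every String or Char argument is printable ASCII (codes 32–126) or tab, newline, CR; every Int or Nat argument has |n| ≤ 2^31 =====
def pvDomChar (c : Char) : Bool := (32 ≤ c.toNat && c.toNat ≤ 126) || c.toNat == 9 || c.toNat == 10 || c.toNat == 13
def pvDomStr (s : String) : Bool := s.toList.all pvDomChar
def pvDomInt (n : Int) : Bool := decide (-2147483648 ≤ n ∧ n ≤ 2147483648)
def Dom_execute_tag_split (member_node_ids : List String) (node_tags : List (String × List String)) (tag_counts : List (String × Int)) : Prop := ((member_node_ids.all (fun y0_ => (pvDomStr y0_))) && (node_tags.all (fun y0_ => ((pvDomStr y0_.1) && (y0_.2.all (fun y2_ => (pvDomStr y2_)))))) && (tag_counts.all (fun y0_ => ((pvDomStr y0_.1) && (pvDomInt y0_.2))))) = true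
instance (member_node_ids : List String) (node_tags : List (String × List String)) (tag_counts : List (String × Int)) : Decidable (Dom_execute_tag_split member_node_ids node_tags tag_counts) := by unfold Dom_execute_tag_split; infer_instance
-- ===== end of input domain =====

-- B replaces A's per-node scan of the sorted tag list (dict of tag-keyed buckets) by a precomputed
-- tag->rank index and minimum-rank assignment into a positional bucket array (alternative decomposition).


-- ===== PORT A =====
-- the body of A's 'for nid in member_node_ids' loop (state = (sub_clusters, assigned))
def pvStepA (ntd : PySem.Dict String (List String)) (sorted_tags : List String)
    (s : PySem.Dict String (List String) × PySem.Set String) (nid : String) :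
    PySem.Dict String (List String) × PySem.Set String :=
  let nid_tags := ntd.getD nid []            -- node_tags.get(nid, set())
  if nid_tags ≠ [] then
    -- 'for tag in sorted_tags: if tag in nid_tags: …; break' = first matching tag
    match sorted_tags.find? (fun t => nid_tags.contains t) with
    | some tag => (s.1.modify tag [] (· ++ [nid]), PySem.Set.add s.2 nid)
    | none => s
  else
    (s.1.modify "_untagged" [] (· ++ [nid]), PySem.Set.add s.2 nid)

def execute_tag_split (member_node_ids : List String) (node_tags : List (String × List String)) (tag_counts : List (String × Int)) : List (List String) :=
  let tcd := PySem.Dict.ofList tag_counts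
  -- sorted(tag_counts.keys(), key=lambda t: tag_counts[t], reverse=True); every t is a key, so [t] = getD t 0
  let sorted_tags := PySem.List.sorted tcd.keys (fun t => tcd.getD t 0) true
  let sub_clusters := (sorted_tags.foldl (fun d t => d.insert t []) PySem.Dict.empty).insert "_untagged" []
  let ntd := PySem.Dict.ofList node_tags
  let final := member_node_ids.foldl (pvStepA ntd sorted_tags) (sub_clusters, PySem.Set.empty)
  let result := final.1.values.filter (fun m => !m.isEmpty)
  PySem.List.sorted result (fun m => PySem.List.len m) true

-- ===== PORT B =====
-- rank = {t: i for i, t in enumerate(sorted_tags)}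
def pvRank (sorted_tags : List String) : PySem.Dict String Int :=
  (PySem.List.enumerate sorted_tags).foldl (fun d p => d.insert p.2 p.1) PySem.Dict.empty

-- buckets[i].append(x)
def pvAppendAt (bs : List (List String)) (i : Int) (x : String) : List (List String) :=
  PySem.List.pySetD bs i (PySem.List.pyGetD bs i [] ++ [x])

-- the body of B's 'for nid in member_node_ids' loop
def pvStepB (ntd : PySem.Dict String (List String)) (rank : PySem.Dict String Int) (untagged : Int)
    (bs : List (List String)) (nid : String) : List (List String) :=
  match ntd.get? nid with                    -- node_tags.get(nid)
  | none => pvAppendAt bs untagged nid       -- 'if not tags'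
  | some tags =>
    if tags.isEmpty then pvAppendAt bs untagged nid
    else
      let ranks := tags.filterMap (fun t => rank.get? t)    -- [rank[t] for t in tags if t in rank]
      match PySem.List.min? ranks (fun r => r) with
      | some r => pvAppendAt bs r nid
      | none => bs

def execute_tag_split_alt (member_node_ids : List String) (node_tags : List (String × List String)) (tag_counts : List (String × Int)) : List (List String) :=
  let tcd := PySem.Dict.ofList tag_counts
  let sorted_tags := PySem.List.sorted tcd.keys (fun t => tcd.getD t 0) true
  let rank := pvRank sorted_tags
  let buckets := List.replicate sorted_tags.length ([] : List String)
  -- untagged = rank.get("_untagged"); if untagged is None: untagged = len(buckets); buckets.append([])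
  let ub := match rank.get? "_untagged" with
    | some r => (r, buckets)
    | none => (PySem.List.len buckets, buckets ++ [[]])
  let ntd := PySem.Dict.ofList node_tags
  let out := member_node_ids.foldl (pvStepB ntd rank ub.1) ub.2
  PySem.List.sorted (out.filter (fun b => !b.isEmpty)) (fun m => PySem.List.len m) true

-- ===== PRECONDITION & SPEC =====
def Spec_execute_tag_split (member_node_ids : List String) (node_tags : List (String × List String)) (tag_counts : List (String × Int)) (out : List (List String)) : Prop := out = execute_tag_split_alt member_node_ids node_tags tag_counts
instance (member_node_ids : List String) (node_tags : List (String × List String)) (tag_counts : List (String × Int)) (out : List (List String)) : Decidable (Spec_execute_tag_split member_node_ids node_tags tag_counts out) := by unfold Spec_execute_tag_split; infer_instance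

-- ===== CLAIM (what is proved, stated in full; the proofs are below) =====
def Claim_equal_execute_tag_split : Prop := ∀ (member_node_ids : List String) (node_tags : List (String × List String)) (tag_counts : List (String × Int)), Dom_execute_tag_split member_node_ids node_tags tag_counts → Spec_execute_tag_split member_node_ids node_tags tag_counts (execute_tag_split member_node_ids node_tags tag_counts)

-- ===== LEMMAS AND PROOFS =====

-- items of pvRank on a Nodup list: the (tag, index) pairs
theorem pvRank_items (st : List String) (hnd : st.Nodup) :
    (pvRank st).items = st.zipIdx.map (fun p => (p.1, (p.2 : Int))) := by
  have hmap : (PySem.List.enumerate st).map (fun p => p.2) = st := by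
    rw [PySem.List.enumerate_eq_zipIdx_map]
    simp [Function.comp_def]
  have h := PySem.Dict.items_foldl_insert_fresh (PySem.List.enumerate st)
    (fun p => p.2) (fun p => p.1) PySem.Dict.empty
    (fun a _ => PySem.Dict.contains_empty _) (by rw [hmap]; exact hnd)
  unfold pvRank
  rw [h, PySem.List.enumerate_eq_zipIdx_map]
  simp [PySem.Dict.empty]

theorem pvRank_keys (st : List String) (hnd : st.Nodup) : (pvRank st).keys = st := by
  rw [PySem.Dict.keys, pvRank_items st hnd]
  simp [Function.comp_def]

theorem pvRank_get?_getElem (st : List String) (hnd : st.Nodup) (i : Nat) (hi : i < st.length) :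
    (pvRank st).get? st[i] = some (i : Int) := by
  rw [PySem.Dict.get?_eq_some_iff_mem_items _ _ _ (by rw [pvRank_keys st hnd]; exact hnd)]
  rw [pvRank_items st hnd]
  have hz : (st[i], i) ∈ st.zipIdx := by
    have h1 : st.zipIdx[i]'(by simpa using hi) = (st[i], i) := by simp
    exact h1 ▸ List.getElem_mem _
  exact List.mem_map_of_mem hz

theorem pvRank_get?_of_not_mem (st : List String) (t : String) (hnd : st.Nodup) (ht : t ∉ st) :
    (pvRank st).get? t = none := by
  rw [PySem.Dict.get?_eq_none_iff_not_mem_keys, pvRank_keys st hnd]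
  exact ht

-- dict-by-key update vs positional update under the zip correspondence
theorem pv_modify_zip (ks : List String) (bs : List (List String)) (hnd : ks.Nodup)
    (hl : bs.length = ks.length) (i : Nat) (hi : i < ks.length) (k : String) (hk : ks[i] = k)
    (f : List String → List String) :
    (PySem.Dict.mk (ks.zip bs)).modify k [] f = PySem.Dict.mk (ks.zip (bs.set i (f (bs[i]'(by omega))))) := by
  subst hk
  have hbi : i < bs.length := by omega
  have hkeys : (PySem.Dict.mk (ks.zip bs)).keys = ks := by
    rw [PySem.Dict.keys_mk]
    exact List.map_fst_zip (by omega)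
  have hmem : (ks[i], bs[i]'hbi) ∈ ks.zip bs := by
    have h1 : (ks.zip bs)[i]'(by simp; omega) = (ks[i], bs[i]'hbi) := List.getElem_zip
    exact h1 ▸ List.getElem_mem _
  have hget : (PySem.Dict.mk (ks.zip bs)).getD ks[i] [] = bs[i]'hbi :=
    PySem.Dict.getD_of_mem_items _ hmem (show ({ items := ks.zip bs } : PySem.Dict String (List String)).keys.Nodup by rw [hkeys]; exact hnd) _
  have hcont : (PySem.Dict.mk (ks.zip bs)).contains ks[i] = true := by
    rw [PySem.Dict.contains_iff_mem_keys, hkeys]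
    exact List.getElem_mem _
  rw [PySem.Dict.modify, hget]
  apply PySem.Dict.ext
  rw [PySem.Dict.items_insert_of_contains _ _ hcont]
  apply List.ext_getElem
  · simp
  · intro j h1 h2
    have hj : j < ks.length := by simp at h1; omega
    have hjb : j < bs.length := by omega
    simp only [List.getElem_map, List.getElem_zip]
    by_cases hji : j = i
    · subst hji
      simp
    · have hne : ks[j] ≠ ks[i] := by
        intro he
        exact hji (List.Nodup.getElem_inj_iff hnd |>.mp he)
      simp [hne, List.getElem_set_ne (by omega : i ≠ j)]

-- one step of A's loop matches one step of B's loop under the zip correspondence: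
-- ks is the bucket-key list (sorted_tags plus, if needed, the extra "_untagged" key),
-- ui the position of the "_untagged" bucket in it
theorem pv_step_corr (st ks : List String) (ui : Nat) (ntd : PySem.Dict String (List String))
    (hpre : st <+: ks) (hnd : ks.Nodup) (hui : ui < ks.length) (hku : ks[ui] = "_untagged")
    (bs : List (List String)) (hl : bs.length = ks.length)
    (s : PySem.Set String) (nid : String) :
    (pvStepA ntd st (PySem.Dict.mk (ks.zip bs), s) nid).1
      = PySem.Dict.mk (ks.zip (pvStepB ntd (pvRank st) (ui : Int) bs nid))
    ∧ (pvStepB ntd (pvRank st) (ui : Int) bs nid).length = ks.length := by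
  have hn : st.Nodup := hpre.sublist.nodup hnd
  have hstk : st.length ≤ ks.length := hpre.length_le
  have happend : ∀ (i : Nat) (hi : i < bs.length),
      pvAppendAt bs (i : Int) nid = bs.set i ((bs[i]'hi) ++ [nid]) := by
    intro i hi
    unfold pvAppendAt
    rw [PySem.List.pySetD_natCast, PySem.List.pyGetD_natCast,
      List.getD_eq_getElem bs [] hi]
  have hmodu : (PySem.Dict.mk (ks.zip bs)).modify "_untagged" [] (· ++ [nid])
      = PySem.Dict.mk (ks.zip (pvAppendAt bs (ui : Int) nid)) := by
    rw [pv_modify_zip ks bs hnd hl ui hui "_untagged" hku (· ++ [nid])]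
    rw [happend ui (by omega)]
  have hlenu : (pvAppendAt bs (ui : Int) nid).length = ks.length := by
    rw [happend ui (by omega)]
    simp [hl]
  unfold pvStepA pvStepB
  cases hg : ntd.get? nid with
  | none =>
    have hgetD : ntd.getD nid [] = [] := by rw [PySem.Dict.getD_eq_get?_getD, hg]; rfl
    simp only [hgetD, ne_eq, not_true_eq_false, if_false]
    exact ⟨hmodu, hlenu⟩
  | some tags =>
    have hgetD : ntd.getD nid [] = tags := by rw [PySem.Dict.getD_eq_get?_getD, hg]; rfl
    by_cases he : tags = []
    · subst he
      simp only [hgetD, ne_eq, not_true_eq_false, if_false, List.isEmpty_nil, if_true]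
      exact ⟨hmodu, hlenu⟩
    · have hie : tags.isEmpty = false := by simp [he]
      simp only [hgetD, ne_eq, he, not_false_eq_true, if_true, hie, Bool.false_eq_true, if_false]
      cases hf : st.find? (fun t => tags.contains t) with
      | none =>
        have hranks : tags.filterMap (fun t => (pvRank st).get? t) = [] := by
          rw [List.filterMap_eq_nil_iff]
          intro t ht
          apply pvRank_get?_of_not_mem st t hn
          intro hts
          have := List.find?_eq_none.mp hf t hts
          simp [ht] at this
        rw [hranks]
        exact ⟨rfl, hl⟩
      | some tag =>
        obtain ⟨hptag, as, bs', hsteq, hall⟩ := List.find?_eq_some_iff_append.mp hf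
        have hmem_tag : tag ∈ tags := by simpa using hptag
        have hj : as.length < st.length := by rw [hsteq]; simp
        have hstj : st[as.length]'hj = tag := by
          rw [List.getElem_of_eq hsteq]
          simp
        have hjr : (pvRank st).get? tag = some (as.length : Int) := by
          rw [← hstj]; exact pvRank_get?_getElem st hn as.length hj
        have hjmem : ((as.length : Nat) : Int) ∈ tags.filterMap (fun t => (pvRank st).get? t) :=
          List.mem_filterMap.mpr ⟨tag, hmem_tag, hjr⟩
        have hmin : PySem.List.min? (tags.filterMap fun t => (pvRank st).get? t) (fun r => r)
            = some ((as.length : Nat) : Int) := by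
          cases hm : PySem.List.min? (tags.filterMap fun t => (pvRank st).get? t) (fun r => r) with
          | none =>
            rw [PySem.List.min?_eq_none_iff] at hm
            rw [hm] at hjmem
            cases hjmem
          | some m =>
            obtain ⟨t, ht, hgt⟩ := List.mem_filterMap.mp (PySem.List.min?_mem hm)
            have hts : t ∈ st := by
              by_contra hnot
              rw [pvRank_get?_of_not_mem st t hn hnot] at hgt
              cases hgt
            obtain ⟨i, hi, hsti⟩ := List.mem_iff_getElem.mp hts
            have hgi : (pvRank st).get? st[i] = some (i : Int) := pvRank_get?_getElem st hn i hi
            rw [hsti] at hgi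
            rw [hgi] at hgt
            injection hgt with hm_eq
            have hile : as.length ≤ i := by
              by_contra hlt
              rw [not_le] at hlt
              have hias : st[i]'hi = as[i]'hlt := by
                rw [List.getElem_of_eq hsteq]
                rw [List.getElem_append_left hlt]
              have hpa := hall (as[i]'hlt) (List.getElem_mem _)
              rw [← hias, hsti] at hpa
              simp [ht] at hpa
            have hmle : m ≤ ((as.length : Nat) : Int) := PySem.List.min?_isMin hm _ hjmem
            have : m = ((as.length : Nat) : Int) := by omega
            rw [this]
        rw [hmin]
        have h1 := pv_modify_zip ks bs hnd hl as.length (by omega) tag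
          (by rw [← hstj]; exact (hpre.getElem (by omega)).symm) (· ++ [nid])
        have hbs : as.length < bs.length := by omega
        have h2 : pvAppendAt bs ((as.length : Nat) : Int) nid
            = bs.set as.length ((bs[as.length]'hbs) ++ [nid]) := happend as.length hbs
        exact ⟨h1.trans (congrArg (fun b => PySem.Dict.mk (ks.zip b)) h2.symm),
          (show (pvAppendAt bs ((as.length : Nat) : Int) nid).length = ks.length by
            rw [h2]; simp [hl])⟩

theorem pv_loop_corr (st ks : List String) (ui : Nat) (ntd : PySem.Dict String (List String))
    (hpre : st <+: ks) (hnd : ks.Nodup) (hui : ui < ks.length) (hku : ks[ui] = "_untagged")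
    (members : List String) :
    ∀ (bs : List (List String)) (s : PySem.Set String), bs.length = ks.length →
    (members.foldl (pvStepA ntd st) (PySem.Dict.mk (ks.zip bs), s)).1
      = PySem.Dict.mk (ks.zip (members.foldl (pvStepB ntd (pvRank st) (ui : Int)) bs)) := by
  induction members with
  | nil => intro bs s _; rfl
  | cons nid rest ih =>
    intro bs s hl
    have h := pv_step_corr st ks ui ntd hpre hnd hui hku bs hl s nid
    simp only [List.foldl_cons]
    have hst : pvStepA ntd st (PySem.Dict.mk (ks.zip bs), s) nid
        = ((pvStepA ntd st (PySem.Dict.mk (ks.zip bs), s) nid).1,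
           (pvStepA ntd st (PySem.Dict.mk (ks.zip bs), s) nid).2) := rfl
    rw [hst, h.1]
    exact ih _ _ h.2

theorem pv_loopB_length (st ks : List String) (ui : Nat) (ntd : PySem.Dict String (List String))
    (hpre : st <+: ks) (hnd : ks.Nodup) (hui : ui < ks.length) (hku : ks[ui] = "_untagged")
    (members : List String) :
    ∀ (bs : List (List String)), bs.length = ks.length →
    (members.foldl (pvStepB ntd (pvRank st) (ui : Int)) bs).length = ks.length := by
  induction members with
  | nil => intro bs hl; exact hl
  | cons nid rest ih =>
    intro bs hl
    exact ih _ (pv_step_corr st ks ui ntd hpre hnd hui hku bs hl PySem.Set.empty nid).2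

theorem pv_zip_replicate {α : Type} (l : List α) :
    l.zip (List.replicate l.length ([] : List String)) = l.map (fun t => (t, ([] : List String))) := by
  induction l with
  | nil => rfl
  | cons x xs ih => simp [List.replicate_succ, ih]

-- ===== VERDICT (by name: the statement is the Claim_ definition above) =====
theorem execute_tag_split_spec : Claim_equal_execute_tag_split := by
  intro members node_tags tag_counts hdom
  unfold Spec_execute_tag_split
  simp only [execute_tag_split, execute_tag_split_alt]
  have hndk : (PySem.Dict.ofList tag_counts).keys.Nodup := PySem.Dict.nodup_keys_ofList tag_counts
  have hnd_st : (PySem.List.sorted (PySem.Dict.ofList tag_counts).keys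
      (fun t => (PySem.Dict.ofList tag_counts).getD t 0) true).Nodup :=
    List.Perm.nodup (PySem.List.sorted_perm _ _ _).symm hndk
  set st := PySem.List.sorted (PySem.Dict.ofList tag_counts).keys
      (fun t => (PySem.Dict.ofList tag_counts).getD t 0) true with hst
  -- the dict {tag: [] for tag in sorted_tags}
  have hitems := PySem.Dict.items_foldl_insert_fresh st (fun t => t) (fun _ => ([] : List String))
    PySem.Dict.empty (fun a _ => PySem.Dict.contains_empty _) (by simpa using hnd_st)
  by_cases hu : "_untagged" ∈ st
  · -- "_untagged" is itself a ranked tag: its bucket is reused, no extra bucket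
    obtain ⟨ui, hui, hkui⟩ := List.mem_iff_getElem.mp hu
    have hget : (pvRank st).get? "_untagged" = some (ui : Int) := by
      rw [← hkui]; exact pvRank_get?_getElem st hnd_st ui hui
    have hcont : (st.foldl (fun d t => d.insert t ([] : List String)) PySem.Dict.empty).contains "_untagged" = true := by
      rw [PySem.Dict.contains_eq_decide_mem_keys, PySem.Dict.keys, hitems]
      simp [PySem.Dict.empty, hu]
    have hsub : (st.foldl (fun d t => d.insert t ([] : List String)) PySem.Dict.empty).insert "_untagged" []
        = PySem.Dict.mk (st.zip (List.replicate st.length [])) := by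
      apply PySem.Dict.ext
      rw [PySem.Dict.items_insert_of_contains _ _ hcont, hitems, pv_zip_replicate]
      simp only [PySem.Dict.empty, List.nil_append, List.map_map]
      apply List.map_congr_left
      intro t _
      by_cases ht : t = "_untagged" <;> simp [ht]
    rw [hget, hsub,
      pv_loop_corr st st ui (PySem.Dict.ofList node_tags) (List.prefix_refl st) hnd_st hui hkui
        members _ PySem.Set.empty (by simp)]
    have hblen := pv_loopB_length st st ui (PySem.Dict.ofList node_tags) (List.prefix_refl st)
      hnd_st hui hkui members (List.replicate st.length []) (by simp)
    rw [PySem.Dict.values_mk, List.map_snd_zip (le_of_eq hblen)]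
  · -- "_untagged" is not a tag: one extra bucket is appended for it
    have hget : (pvRank st).get? "_untagged" = none := pvRank_get?_of_not_mem st _ hnd_st hu
    have hnd' : (st ++ ["_untagged"]).Nodup :=
      List.Nodup.append hnd_st (List.nodup_singleton _)
        (fun a ha hb => hu ((List.mem_singleton.mp hb) ▸ ha))
    have hcont : (st.foldl (fun d t => d.insert t ([] : List String)) PySem.Dict.empty).contains "_untagged" = false := by
      rw [PySem.Dict.contains_eq_decide_mem_keys, PySem.Dict.keys, hitems]
      simp [PySem.Dict.empty, hu]
    have hsub : (st.foldl (fun d t => d.insert t ([] : List String)) PySem.Dict.empty).insert "_untagged" []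
        = PySem.Dict.mk ((st ++ ["_untagged"]).zip (List.replicate st.length [] ++ [[]])) := by
      apply PySem.Dict.ext
      rw [PySem.Dict.items_insert_of_not_contains _ _ hcont, hitems]
      have hz := pv_zip_replicate (st ++ ["_untagged"])
      simp only [List.length_append, List.length_cons, List.length_nil,
        List.replicate_succ', List.replicate] at hz
      rw [hz]
      simp [PySem.Dict.empty]
    have hui : st.length < (st ++ ["_untagged"]).length := by simp
    have hkui : (st ++ ["_untagged"])[st.length]'hui = "_untagged" := by simp
    have hulen : PySem.List.len (List.replicate st.length ([] : List String)) = (st.length : Int) := by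
      rw [PySem.List.len_eq]; simp
    rw [hget, hsub, hulen,
      pv_loop_corr st (st ++ ["_untagged"]) st.length (PySem.Dict.ofList node_tags)
        (List.prefix_append st _) hnd' hui hkui members _ PySem.Set.empty (by simp)]
    have hblen := pv_loopB_length st (st ++ ["_untagged"]) st.length (PySem.Dict.ofList node_tags)
      (List.prefix_append st _) hnd' hui hkui members (List.replicate st.length [] ++ [[]]) (by simp)
    rw [PySem.Dict.values_mk, List.map_snd_zip (le_of_eq hblen)]
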